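-- pv_equiv track=rewrite | github.com/Minerstove/Python | cs11/Practice4.py | rotate_cw_k
-- ===== SOURCE A (Python) =====
-- def rotate_cw_k(painting, k):
--     equiv_turns = k % 4
--     def rotator(painting, turns):
--         C = len(painting[0])
--         R = len(painting)
--         if turns == 0:
--             return painting
--         flip_grid = tuple(
--             "".join(painting[R-1-i][j] for i in range(R))
--             for j in range(C))
--         return rotator(flip_grid, turns - 1)
--     return rotator(painting, equiv_turns)
-- ===== SOURCE B (Python) =====
-- def rotate_cw_k(painting, k):
--     t = k % 4
--     for _ in range(t):
--         width = len(painting[0])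
--         painting = tuple(
--             "".join(row[j] for row in reversed(painting))
--             for j in range(width))
--     return painting
-- ===== Notes on version B (the rewrite author's own statement) =====
-- stated objective: alternative
-- what changed: Replaced A's inner recursive rotator helper with an iterative loop that folds k % 4 clockwise-turn passes, each pass built by transposing the reversed row list instead of indexing rows at R-1-i.
import Mathlib
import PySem

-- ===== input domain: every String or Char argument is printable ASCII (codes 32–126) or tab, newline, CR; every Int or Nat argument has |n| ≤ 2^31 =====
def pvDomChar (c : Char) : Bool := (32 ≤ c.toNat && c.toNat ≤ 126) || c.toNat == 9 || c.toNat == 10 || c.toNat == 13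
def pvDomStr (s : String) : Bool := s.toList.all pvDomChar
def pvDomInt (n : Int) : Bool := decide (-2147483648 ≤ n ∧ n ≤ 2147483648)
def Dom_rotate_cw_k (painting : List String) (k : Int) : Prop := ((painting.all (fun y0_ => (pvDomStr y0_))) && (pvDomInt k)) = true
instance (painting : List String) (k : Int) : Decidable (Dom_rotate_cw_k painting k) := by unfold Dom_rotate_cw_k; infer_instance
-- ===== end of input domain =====

-- B replaces A's recursive helper by an iterative fold of k % 4 clockwise-turn passes,
-- each pass transposing the reversed row list (same per-turn step, different decomposition); no speed claim.

-- ===== PORT A =====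
-- rotator(painting, turns): turns is k % 4 ∈ [0,3], carried as a Nat for structural recursion
def pvRotatorA (painting : List String) (turns : Nat) : List String :=
  let C := ((PySem.List.pyGet? painting 0).getD "").toList.length
  let R := painting.length
  match turns with
  | 0 => painting
  | n + 1 =>
    let flip_grid := (List.range C).map (fun (j : Nat) =>
      String.ofList ((List.range R).map (fun (i : Nat) =>
        (PySem.Str.pyGet? ((PySem.List.pyGet? painting ((R : Int) - 1 - (i : Int))).getD "") (j : Int)).getD ' ')))
    pvRotatorA flip_grid n

def rotate_cw_k (painting : List String) (k : Int) : List String :=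
  let equiv_turns := PySem.Int.mod k 4
  pvRotatorA painting equiv_turns.toNat

-- ===== PORT B =====
-- one clockwise turn: columns j of the reversed row list, joined into strings
def pvTurnB (p : List String) : List String :=
  let width := ((PySem.List.pyGet? p 0).getD "").toList.length
  (List.range width).map (fun (j : Nat) =>
    String.ofList (p.reverse.map (fun row => (PySem.Str.pyGet? row (j : Int)).getD ' ')))

def rotate_cw_k_alt (painting : List String) (k : Int) : List String :=
  let t := (PySem.Int.mod k 4).toNat
  (List.range t).foldl (fun p _ => pvTurnB p) painting

-- ===== PRECONDITION & SPEC =====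
-- Pre_ excludes exactly the inputs where Python A raises IndexError: the empty grid
-- (len(painting[0]) is evaluated even for 0 turns), and grids that must actually turn
-- (k % 4 ≠ 0) whose first row is empty or longer than some other row.
def Pre_rotate_cw_k (painting : List String) (k : Int) : Prop :=
  painting ≠ [] ∧
    (PySem.Int.mod k 4 = 0 ∨
      (0 < painting.headI.toList.length ∧
        ∀ row ∈ painting, painting.headI.toList.length ≤ row.toList.length))
instance (painting : List String) (k : Int) : Decidable (Pre_rotate_cw_k painting k) := by
  unfold Pre_rotate_cw_k; infer_instance

def pvWitness_rotate_cw_k : List String × Int := (["ab", "cd"], 1)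

def Spec_rotate_cw_k (painting : List String) (k : Int) (out : List String) : Prop := out = rotate_cw_k_alt painting k
instance (painting : List String) (k : Int) (out : List String) : Decidable (Spec_rotate_cw_k painting k out) := by unfold Spec_rotate_cw_k; infer_instance

-- ===== CLAIM (what is proved, stated in full; the proofs are below) =====
def Claim_equal_rotate_cw_k : Prop := ∀ (painting : List String) (k : Int), Dom_rotate_cw_k painting k → Pre_rotate_cw_k painting k → Spec_rotate_cw_k painting k (rotate_cw_k painting k)

-- ===== LEMMAS AND PROOFS =====

-- reversed-rows traversal = indexing rows at R-1-i for i in range(R)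
theorem pv_reverse_map_eq_range {α : Type} [Inhabited α] {β : Type} (p : List α) (f : α → β) :
    p.reverse.map f
      = (List.range p.length).map (fun (i : Nat) =>
          f ((PySem.List.pyGet? p ((p.length : Int) - 1 - (i : Int))).getD default)) := by
  apply List.ext_getElem
  · simp
  · intro i h1 h2
    simp only [List.length_map, List.length_reverse] at h1
    have hidx : ((p.length : Int) - 1 - (i : Int)) = ((p.length - 1 - i : Nat) : Int) := by omega
    simp only [List.getElem_map, List.getElem_reverse, List.getElem_range, hidx,
      PySem.List.pyGet?_natCast]
    rw [List.getElem?_eq_getElem (by omega)]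
    rfl

-- A's one-turn grid is B's one-turn grid
theorem pv_flip_eq_turnB (p : List String) :
    (List.range ((PySem.List.pyGet? p 0).getD "").toList.length).map (fun (j : Nat) =>
        String.ofList ((List.range p.length).map (fun (i : Nat) =>
          (PySem.Str.pyGet? ((PySem.List.pyGet? p ((p.length : Int) - 1 - (i : Int))).getD "") (j : Int)).getD ' ')))
      = pvTurnB p := by
  unfold pvTurnB
  refine List.map_congr_left (fun j _ => ?_)
  rw [pv_reverse_map_eq_range p (fun row => (PySem.Str.pyGet? row (j : Int)).getD ' ')]
  rfl

-- the recursive rotator is the fold of the one-turn step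
theorem pv_rotatorA_eq_foldl (t : Nat) (p : List String) :
    pvRotatorA p t = (List.range t).foldl (fun q _ => pvTurnB q) p := by
  induction t generalizing p with
  | zero => simp [pvRotatorA]
  | succ n ih =>
      rw [pvRotatorA]
      rw [pv_flip_eq_turnB p, ih, List.range_succ_eq_map, List.foldl_cons, List.foldl_map]

-- ===== VERDICT (by name: the statement is the Claim_ definition above) =====
theorem rotate_cw_k_spec : Claim_equal_rotate_cw_k := by
  intro painting k _ _
  unfold Spec_rotate_cw_k rotate_cw_k rotate_cw_k_alt
  exact pv_rotatorA_eq_foldl _ painting
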